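-- pv_equiv track=rewrite | github.com/yxu1998/miscellaneous-stuffs | hw3.py | extract_third
-- ===== SOURCE A (Python) =====
-- def extract_third(s):
--     """
--     s:str, a list of names
--     returns: str, the third name on the list
--     precondition: s is a string of at least 3 names separated by a comma. Each
--     name should be a non-empty sequence of letters
--     """
--     n=0
--     num1=0
--     num2=0
--     acc=[]
--     for char in s:
--         n+=1
--         if char==",":
--             acc.append(n)
--     if len(acc)==2:
--
--         return s[acc[1]:n]
--     else:
--         return s[acc[1]:acc[2]-1]
--
--
--
--
--     pass
-- ===== SOURCE B (Python) =====
-- def extract_third(s):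
--     return s.split(',')[2]
-- ===== Notes on version B (the rewrite author's own statement) =====
-- stated objective: idiomatic
-- what changed: Replaces A's manual character-by-character scan that records comma positions and its two-case slice arithmetic with a single split on ',' followed by indexing the third field.
import Mathlib
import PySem

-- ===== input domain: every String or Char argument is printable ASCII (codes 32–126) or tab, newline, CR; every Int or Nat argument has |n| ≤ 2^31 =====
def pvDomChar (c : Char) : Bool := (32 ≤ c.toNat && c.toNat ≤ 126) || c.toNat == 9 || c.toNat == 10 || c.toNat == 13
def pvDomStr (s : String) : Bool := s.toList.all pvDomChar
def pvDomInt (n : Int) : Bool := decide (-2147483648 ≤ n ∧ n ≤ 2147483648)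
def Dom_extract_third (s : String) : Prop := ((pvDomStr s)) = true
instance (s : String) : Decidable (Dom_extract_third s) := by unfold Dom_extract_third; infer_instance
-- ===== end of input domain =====

-- B replaces A's manual comma-position scan and two-case slice by split-on-comma + index (idiomatic, same O(n) cost).


-- ===== PORT A =====
-- literal port of A: scan the characters, counting them in n and recording
-- 1-based positions just after each comma in acc, then slice in two cases.
def extract_third (s : String) : String :=
  let r := s.toList.foldl
    (fun (st : Int × List Int) c =>
      (st.1 + 1, if c = ',' then st.2 ++ [st.1 + 1] else st.2)) (0, [])
  let n := r.1
  let acc := r.2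
  if acc.length = 2 then
    match PySem.List.pyGet? acc 1 with
    | some a1 => String.ofList (PySem.List.slice s.toList (some a1) (some n))
    | none => ""   -- IndexError (fewer than 2 commas): excluded by Pre_
  else
    match PySem.List.pyGet? acc 1, PySem.List.pyGet? acc 2 with
    | some a1, some a2 =>
        String.ofList (PySem.List.slice s.toList (some a1) (some (a2 - 1)))
    | _, _ => ""   -- IndexError (fewer than 2 commas): excluded by Pre_

-- ===== PORT B =====
-- literal port of B: s.split(',')[2]
def extract_third_alt (s : String) : String :=
  match PySem.List.pyGet? (PySem.Chars.splitOn s.toList [',']) 2 with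
  | some f => String.ofList f
  | none => ""   -- IndexError (fewer than 2 commas): excluded by Pre_

-- ===== PRECONDITION & SPEC =====
-- Pre_ excludes exactly the inputs with fewer than two commas, on which A raises
-- IndexError (acc[1] or acc[2] out of range); B raises IndexError there too.
def Pre_extract_third (s : String) : Prop := 2 ≤ s.toList.count ','
instance (s : String) : Decidable (Pre_extract_third s) := by unfold Pre_extract_third; infer_instance

def pvWitness_extract_third : String := "ann,bob,carl"

def Spec_extract_third (s : String) (out : String) : Prop := out = extract_third_alt s
instance (s : String) (out : String) : Decidable (Spec_extract_third s out) := by unfold Spec_extract_third; infer_instance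

-- ===== CLAIM (what is proved, stated in full; the proofs are below) =====
def Claim_equal_extract_third : Prop := ∀ (s : String), Dom_extract_third s → Pre_extract_third s → Spec_extract_third s (extract_third s)

-- ===== LEMMAS AND PROOFS =====

-- the loop body of A's port, named for the lemmas
def pvStep : Int × List Int → Char → Int × List Int :=
  fun st c => (st.1 + 1, if c = ',' then st.2 ++ [st.1 + 1] else st.2)

theorem pvStep_foldl_nosep (p : List Char) (hp : ',' ∉ p) :
    ∀ (n : Int) (a : List Int), p.foldl pvStep (n, a) = (n + p.length, a) := by
  induction p with
  | nil => intro n a; simp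
  | cons c t ih =>
    intro n a
    have hc : c ≠ ',' := fun h => hp (h ▸ List.mem_cons_self)
    have ht : ',' ∉ t := fun h => hp (List.mem_cons_of_mem _ h)
    simp only [List.foldl_cons, pvStep, if_neg hc]
    rw [ih ht]
    simp only [Prod.mk.injEq, List.length_cons, and_true]
    push_cast; ring

theorem pvStep_foldl_fst (l : List Char) :
    ∀ (n : Int) (a : List Int), (l.foldl pvStep (n, a)).1 = n + l.length := by
  induction l with
  | nil => intro n a; simp
  | cons c t ih =>
    intro n a
    simp only [List.foldl_cons, pvStep]
    rw [ih]
    simp only [List.length_cons]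
    push_cast; ring

theorem pvStep_foldl_snd_append (l : List Char) :
    ∀ (n : Int) (a b : List Int),
      (l.foldl pvStep (n, a ++ b)).2 = a ++ (l.foldl pvStep (n, b)).2 := by
  induction l with
  | nil => intro n a b; simp
  | cons c t ih =>
    intro n a b
    by_cases hc : c = ','
    · simp only [List.foldl_cons, pvStep, if_pos hc, List.append_assoc, ih]
    · simp only [List.foldl_cons, pvStep, if_neg hc, ih]

-- splitOn.go: the accumulator is a reversed prefix of the output
theorem pvGo_acc (fuel : Nat) :
    ∀ (l cur : List Char) (acc : List (List Char)),
      PySem.Chars.splitOn.go [','] fuel l cur acc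
        = acc.reverse ++ PySem.Chars.splitOn.go [','] fuel l cur [] := by
  induction fuel with
  | zero => intro l cur acc; simp [PySem.Chars.splitOn.go]
  | succ f ih =>
    intro l cur acc
    cases l with
    | nil => simp [PySem.Chars.splitOn.go]
    | cons c rest =>
      simp only [PySem.Chars.splitOn.go]
      by_cases hc : [','].isPrefixOf (c :: rest) = true
      · rw [if_pos hc, if_pos hc, ih _ _ (cur.reverse :: acc), ih _ _ [cur.reverse]]
        simp
      · rw [if_neg hc, if_neg hc, ih]

-- splitOn.go on a comma-free piece: it all goes into the current field
theorem pvGo_nosep (p : List Char) (hp : ',' ∉ p) :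
    ∀ (fuel : Nat) (cur : List Char) (acc : List (List Char)), p.length ≤ fuel →
      PySem.Chars.splitOn.go [','] fuel p cur acc
        = acc.reverse ++ [cur.reverse ++ p] := by
  induction p with
  | nil =>
    intro fuel cur acc _
    cases fuel <;> simp [PySem.Chars.splitOn.go]
  | cons c t ih =>
    intro fuel cur acc hf
    cases fuel with
    | zero => simp at hf
    | succ f =>
      have hc : c ≠ ',' := fun h => hp (h ▸ List.mem_cons_self)
      have hpre : ¬ ([','].isPrefixOf (c :: t) = true) := by
        simp [List.isPrefixOf]; exact fun h => absurd h.symm hc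
      have ht : ',' ∉ t := fun h => hp (List.mem_cons_of_mem _ h)
      simp only [PySem.Chars.splitOn.go, if_neg hpre]
      rw [ih ht f (c :: cur) acc (by simp at hf; omega)]
      simp

-- splitOn.go past a leading comma-free piece and its comma
theorem pvGo_sep (p t : List Char) (hp : ',' ∉ p) :
    ∀ (fuel : Nat) (cur : List Char) (acc : List (List Char)),
      p.length + 1 ≤ fuel →
      PySem.Chars.splitOn.go [','] fuel (p ++ ',' :: t) cur acc
        = PySem.Chars.splitOn.go [','] (fuel - (p.length + 1)) t [] ((cur.reverse ++ p) :: acc) := by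
  induction p with
  | nil =>
    intro fuel cur acc hf
    cases fuel with
    | zero => simp at hf
    | succ f =>
      have hpre : [','].isPrefixOf (',' :: t) = true := by simp [List.isPrefixOf]
      simp [PySem.Chars.splitOn.go]
  | cons c q ih =>
    intro fuel cur acc hf
    cases fuel with
    | zero => simp at hf
    | succ f =>
      have hc : c ≠ ',' := fun h => hp (h ▸ List.mem_cons_self)
      have hq : ',' ∉ q := fun h => hp (List.mem_cons_of_mem _ h)
      have hpre : ¬ ([','].isPrefixOf (c :: (q ++ ',' :: t)) = true) := by
        simp [List.isPrefixOf]; exact fun h => absurd h.symm hc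
      simp only [List.cons_append, PySem.Chars.splitOn.go, if_neg hpre]
      rw [ih hq f (c :: cur) acc (by simp at hf; omega)]
      have e1 : f + 1 - ((c :: q).length + 1) = f - (q.length + 1) := by
        simp only [List.length_cons]; omega
      have e2 : (c :: cur).reverse ++ q = cur.reverse ++ (c :: q) := by simp
      rw [e1, e2]

theorem pvSplitOn_nosep (p : List Char) (hp : ',' ∉ p) :
    PySem.Chars.splitOn p [','] = [p] := by
  unfold PySem.Chars.splitOn
  rw [pvGo_nosep p hp _ [] [] (by omega)]
  simp

theorem pvSplitOn_comma (p t : List Char) (hp : ',' ∉ p) :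
    PySem.Chars.splitOn (p ++ ',' :: t) [','] = p :: PySem.Chars.splitOn t [','] := by
  unfold PySem.Chars.splitOn
  rw [pvGo_sep p t hp _ [] []
        (by simp only [List.length_append, List.length_cons]; omega)]
  have e : (p ++ ',' :: t).length + 1 - (p.length + 1) = t.length + 1 := by
    simp only [List.length_append, List.length_cons]; omega
  rw [e, pvGo_acc]
  simp

-- a comma-free piece followed by its comma, seen by A's loop
theorem pvStep_foldl_piece (p : List Char) (hp : ',' ∉ p) (n : Int) (a : List Int) :
    (p ++ [',']).foldl pvStep (n, a) = (n + p.length + 1, a ++ [n + p.length + 1]) := by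
  rw [List.foldl_append, pvStep_foldl_nosep p hp]
  simp [pvStep]

-- first-occurrence decomposition at a comma
theorem pvSplitAtComma (l : List Char) (h : ',' ∈ l) :
    ∃ p t, ',' ∉ p ∧ l = p ++ ',' :: t := by
  induction l with
  | nil => simp at h
  | cons c rest ih =>
    by_cases hc : c = ','
    · exact ⟨[], rest, by simp, by simp [hc]⟩
    · have hr : ',' ∈ rest := by
        rcases List.mem_cons.mp h with h1 | h1
        · exact absurd h1.symm hc
        · exact h1
      obtain ⟨p, t, hp, he⟩ := ih hr
      refine ⟨c :: p, t, ?_, by simp [he]⟩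
      intro hmem
      rcases List.mem_cons.mp hmem with h1 | h1
      · exact hc h1.symm
      · exact hp h1

theorem pvCount_eq_zero (l : List Char) (h : ',' ∉ l) : l.count ',' = 0 :=
  List.count_eq_zero.mpr h

theorem extract_third_spec' (s : String) (hpre : Pre_extract_third s) :
    extract_third s = extract_third_alt s := by
  unfold Pre_extract_third at hpre
  set cs := s.toList with hcs
  -- decompose at the first two commas
  have h1 : ',' ∈ cs := List.count_pos_iff.mp (by omega)
  obtain ⟨p, t1, hp, he1⟩ := pvSplitAtComma cs h1
  have h2 : ',' ∈ t1 := by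
    rw [he1] at hpre
    simpa [List.count_append, pvCount_eq_zero p hp] using hpre
  obtain ⟨q, rest, hq, he2⟩ := pvSplitAtComma t1 h2
  have hecs : cs = (p ++ [',']) ++ ((q ++ [',']) ++ rest) := by rw [he1, he2]; simp
  have hecs2 : cs = p ++ ',' :: (q ++ ',' :: rest) := by rw [he1, he2]
  -- A's loop on the decomposed string
  have hfold : ∀ (init : Int × List Int), cs.foldl
      (fun (st : Int × List Int) c =>
        (st.1 + 1, if c = ',' then st.2 ++ [st.1 + 1] else st.2)) init
      = cs.foldl pvStep init := by intro init; rfl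
  have hpq : cs.foldl pvStep (0, []) =
      rest.foldl pvStep (((p.length : Int) + q.length + 2),
        [((p.length : Int) + 1), ((p.length : Int) + q.length + 2)]) := by
    rw [hecs, List.foldl_append, pvStep_foldl_piece p hp, List.foldl_append,
        pvStep_foldl_piece q hq]
    congr 1
    simp only [Prod.mk.injEq, List.nil_append, List.singleton_append, List.cons.injEq, and_true]
    refine ⟨by ring, by ring, by ring⟩
  -- B's fields
  have hsplit2 : PySem.Chars.splitOn cs [','] = p :: q :: PySem.Chars.splitOn rest [','] := by
    rw [hecs2, pvSplitOn_comma p _ hp, pvSplitOn_comma q _ hq]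
  -- the slice start index cs[p.len+q.len+2 : …] drops exactly p, the commas and q
  have hdrop : cs.drop (p.length + q.length + 2) = rest := by
    rw [hecs, show (p ++ [',']) ++ ((q ++ [',']) ++ rest)
          = (p ++ [','] ++ (q ++ [','])) ++ rest by simp]
    rw [List.drop_left' (by simp only [List.length_append, List.length_cons,
          List.length_nil]; omega)]
  by_cases hr : ',' ∈ rest
  · -- a third comma exists: A takes the else branch, the field is r
    obtain ⟨r, rest2, hrnf, her⟩ := pvSplitAtComma rest hr
    have her' : rest = (r ++ [',']) ++ rest2 := by rw [her]; simp
    have hfold2 : cs.foldl pvStep (0, []) =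
        rest2.foldl pvStep (((p.length : Int) + q.length + 2 + r.length + 1),
          [((p.length : Int) + 1), ((p.length : Int) + q.length + 2),
           ((p.length : Int) + q.length + 2 + r.length + 1)]) := by
      rw [hpq, her', List.foldl_append, pvStep_foldl_piece r hrnf]
      congr 1
    have hsnd : (cs.foldl pvStep (0, [])).2 =
        [((p.length : Int) + 1), ((p.length : Int) + q.length + 2),
         ((p.length : Int) + q.length + 2 + r.length + 1)]
        ++ (rest2.foldl pvStep (((p.length : Int) + q.length + 2 + r.length + 1), [])).2 := by
      rw [hfold2]
      simpa using pvStep_foldl_snd_append rest2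
        (((p.length : Int) + q.length + 2 + r.length + 1))
        [((p.length : Int) + 1), ((p.length : Int) + q.length + 2),
         ((p.length : Int) + q.length + 2 + r.length + 1)] []
    unfold extract_third extract_third_alt
    simp only [← hcs, hfold]
    rw [show (cs.foldl pvStep (0, []))
          = ((cs.foldl pvStep (0, [])).1, (cs.foldl pvStep (0, [])).2) from rfl, hsnd]
    set extra := (rest2.foldl pvStep (((p.length : Int) + q.length + 2 + r.length + 1), [])).2 with hextra
    have hlen : (([((p.length : Int) + 1), ((p.length : Int) + q.length + 2),
         ((p.length : Int) + q.length + 2 + r.length + 1)] ++ extra).length) ≠ 2 := by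
      simp only [List.length_append, List.length_cons]; omega
    rw [if_neg hlen]
    have hg1 : PySem.List.pyGet? ([((p.length : Int) + 1), ((p.length : Int) + q.length + 2),
         ((p.length : Int) + q.length + 2 + r.length + 1)] ++ extra) 1
        = some (((p.length : Int) + q.length + 2)) := by
      rw [show (1 : Int) = ((1 : Nat) : Int) by norm_num, PySem.List.pyGet?_natCast]
      simp
    have hg2 : PySem.List.pyGet? ([((p.length : Int) + 1), ((p.length : Int) + q.length + 2),
         ((p.length : Int) + q.length + 2 + r.length + 1)] ++ extra) 2
        = some (((p.length : Int) + q.length + 2 + r.length + 1)) := by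
      rw [show (2 : Int) = ((2 : Nat) : Int) by norm_num, PySem.List.pyGet?_natCast]
      simp
    have hgB : PySem.List.pyGet? (p :: q :: r :: PySem.Chars.splitOn rest2 [',']) 2
        = some r := by
      rw [show (2 : Int) = ((2 : Nat) : Int) by norm_num, PySem.List.pyGet?_natCast]
      simp
    simp only [hg1, hg2, hsplit2, her, pvSplitOn_comma r rest2 hrnf, hgB]
    -- A's slice: cs[p.len+q.len+2 : p.len+q.len+2+r.len] = r
    have hc1 : ((p.length : Int) + q.length + 2 + r.length + 1) - 1
        = ((p.length + q.length + 2 + r.length : Nat) : Int) := by push_cast; ring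
    have hc0 : ((p.length : Int) + q.length + 2)
        = ((p.length + q.length + 2 : Nat) : Int) := by push_cast; ring
    rw [hc1, hc0, PySem.List.slice_natCast, hdrop,
        show p.length + q.length + 2 + r.length - (p.length + q.length + 2) = r.length by omega,
        her, List.take_left' rfl]
  · -- exactly two commas: A takes the then branch, the field is rest
    have hsnd : (cs.foldl pvStep (0, [])).2 =
        [((p.length : Int) + 1), ((p.length : Int) + q.length + 2)] := by
      rw [hpq, pvStep_foldl_nosep rest hr]
    have hfst : (cs.foldl pvStep (0, [])).1 = ((cs.length : Nat) : Int) := by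
      rw [pvStep_foldl_fst]; simp
    unfold extract_third extract_third_alt
    simp only [← hcs, hfold]
    rw [show (cs.foldl pvStep (0, []))
          = ((cs.foldl pvStep (0, [])).1, (cs.foldl pvStep (0, [])).2) from rfl, hsnd, hfst]
    simp only [List.length_cons, List.length_nil]
    have hg1 : PySem.List.pyGet? [((p.length : Int) + 1), ((p.length : Int) + q.length + 2)] 1
        = some (((p.length : Int) + q.length + 2)) := by
      rw [show (1 : Int) = ((1 : Nat) : Int) by norm_num, PySem.List.pyGet?_natCast]
      simp
    have hgB : PySem.List.pyGet? [p, q, rest] 2 = some rest := by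
      rw [show (2 : Int) = ((2 : Nat) : Int) by norm_num, PySem.List.pyGet?_natCast]
      simp
    simp only [hg1, hsplit2, pvSplitOn_nosep rest hr, hgB]
    -- A's slice: cs[p.len+q.len+2 : cs.len] = rest
    have hc0 : ((p.length : Int) + q.length + 2)
        = ((p.length + q.length + 2 : Nat) : Int) := by push_cast; ring
    have hlencs : cs.length = p.length + q.length + 2 + rest.length := by
      rw [hecs]; simp only [List.length_append, List.length_cons, List.length_nil]; omega
    rw [hc0, PySem.List.slice_natCast, hdrop, hlencs,
        show p.length + q.length + 2 + rest.length - (p.length + q.length + 2)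
          = rest.length by omega, List.take_length]
    simp

-- ===== VERDICT (by name: the statement is the Claim_ definition above) =====
theorem extract_third_spec : Claim_equal_extract_third := by
  intro s _ hpre
  unfold Spec_extract_third
  exact extract_third_spec' s hpre
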